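-- pv_equiv track=rewrite | github.com/hacetin/keydev | webtool/app.py | hover_text
-- ===== SOURCE A (Python) =====
-- def hover_text(l):
--     """
--     Create a readable text to show when hovering the venn diagram.
--     """
--     # return "<br>".join(l)
--     if not l:
--         return ""
--
--     l = list(l)
--     text = l[0] + ", "
--     for i in range(1, len(l)):
--         if i % 3 == 0:
--             text += "<br>"
--         text += l[i] + ", "
--
--     return text[:-2]
-- ===== SOURCE B (Python) =====
-- def hover_text(l):
--     """
--     Create a readable text to show when hovering the venn diagram.
--     """
--     if not l:
--         return ""
--
--     l = list(l)
--     chunks = [", ".join(l[i:i + 3]) for i in range(0, len(l), 3)]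
--     return ", <br>".join(chunks)
-- ===== Notes on version B (the rewrite author's own statement) =====
-- stated objective: idiomatic
-- what changed: Replaces the index-plus-modulo string-accumulation loop and trailing-separator strip with slicing the list into chunks of 3 joined by ', ' and joining the chunks with ', <br>'.
import Mathlib
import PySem

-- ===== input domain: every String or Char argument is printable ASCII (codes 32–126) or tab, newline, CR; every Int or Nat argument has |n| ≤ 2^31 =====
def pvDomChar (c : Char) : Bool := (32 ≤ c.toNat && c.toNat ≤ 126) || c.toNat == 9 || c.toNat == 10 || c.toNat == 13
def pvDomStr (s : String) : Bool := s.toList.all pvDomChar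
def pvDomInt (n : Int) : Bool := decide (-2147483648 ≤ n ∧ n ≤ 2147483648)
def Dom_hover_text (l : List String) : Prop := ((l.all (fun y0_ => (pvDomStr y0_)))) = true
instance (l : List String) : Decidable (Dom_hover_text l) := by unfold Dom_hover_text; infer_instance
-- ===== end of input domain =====

-- B replaces A's index-plus-modulo accumulation loop (and trailing-separator strip) with
-- chunks of 3 joined by ", " and chunk-joining by ", <br>"; same return value on every list.

-- ===== PORT A =====
def hover_text (l : List String) : String :=
  if l = [] then ""
  else
    let text := PySem.List.pyGetD l 0 "" ++ ", "
    let text := (PySem.List.pyRange 1 (PySem.List.len l) 1).foldl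
      (fun t i =>
        (if PySem.Int.mod i 3 = 0 then t ++ "<br>" else t) ++ PySem.List.pyGetD l i "" ++ ", ")
      text
    PySem.Str.slice text none (some (-2))

-- ===== PORT B =====
def hover_text_alt (l : List String) : String :=
  if l = [] then ""
  else
    PySem.Str.join ", <br>"
      ((PySem.List.pyRange 0 (PySem.List.len l) 3).map
        (fun i => PySem.Str.join ", " (PySem.List.slice l (some i) (some (i + 3)))))

-- ===== PRECONDITION & SPEC =====
def Spec_hover_text (l : List String) (out : String) : Prop := out = hover_text_alt l
instance (l : List String) (out : String) : Decidable (Spec_hover_text l out) := by unfold Spec_hover_text; infer_instance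

-- ===== CLAIM (what is proved, stated in full; the proofs are below) =====
def Claim_equal_hover_text : Prop := ∀ (l : List String), Dom_hover_text l → Spec_hover_text l (hover_text l)

-- ===== LEMMAS AND PROOFS =====

-- char-level picture of A's loop: the item at absolute index p gets "<br>" iff p % 3 = 0
def tagCat : Nat → List (List Char) → List Char
  | _, [] => []
  | p, s :: r => (if p % 3 = 0 then "<br>".toList else []) ++ s ++ ", ".toList ++ tagCat (p + 1) r

-- B's chunk structure
def chunks3 {α : Type} : List α → List (List α)
  | [] => []
  | [a] => [[a]]
  | [a, b] => [[a, b]]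
  | a :: b :: c :: r => [a, b, c] :: chunks3 r

def joinedChunks (l : List String) : List Char :=
  PySem.Chars.join ", <br>".toList
    ((chunks3 l).map (fun c => PySem.Chars.join ", ".toList (c.map String.toList)))

theorem tagCat_phase (r : List (List Char)) : ∀ p, tagCat (p + 3) r = tagCat p r := by
  induction r with
  | nil => intro p; rfl
  | cons s r ih =>
      intro p
      simp only [tagCat, Nat.add_mod_right, ih (p + 1)]

theorem pyRange3_nil {a b : Int} (h : b ≤ a) : PySem.List.pyRange a b 3 = [] := by
  rw [PySem.List.pyRange_of_pos _ _ (by norm_num)]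
  simp [show ¬ a < b by omega]

theorem pyRange3_cons {a b : Int} (h : a < b) :
    PySem.List.pyRange a b 3 = a :: PySem.List.pyRange (a + 3) b 3 := by
  rw [PySem.List.pyRange_of_pos _ _ (by norm_num), PySem.List.pyRange_of_pos _ _ (by norm_num)]
  have hcnt : ((b - a + 3 - 1) / 3).toNat
      = (if a + 3 < b then ((b - (a + 3) + 3 - 1) / 3).toNat else 0) + 1 := by
    split <;> omega
  rw [if_pos h, hcnt, List.range_succ_eq_map]
  simp only [List.map_cons, List.map_map, Nat.cast_zero, mul_zero, add_zero]
  congr 1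
  apply List.map_congr_left
  intro k _
  simp only [Function.comp_apply, Nat.succ_eq_add_one]
  push_cast
  ring

theorem mapSliceGen : ∀ (r l : List String) (i : Nat), l.drop i = r →
    (PySem.List.pyRange (i : Int) (l.length : Int) 3).map
      (fun j => PySem.List.slice l (some j) (some (j + 3))) = chunks3 r := by
  intro r
  induction r using chunks3.induct with
  | case1 =>
      intro l i h
      rw [pyRange3_nil (by exact_mod_cast List.drop_eq_nil_iff.mp h)]
      rfl
  | case2 a =>
      intro l i h
      have hlen : l.length = i + 1 := by
        have := congrArg List.length h; simp [List.length_drop] at this; omega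
      rw [pyRange3_cons (by exact_mod_cast (by omega : i < l.length))]
      rw [show ((i : Int) + 3) = ((i + 3 : Nat) : Int) by push_cast; ring,
          pyRange3_nil (by exact_mod_cast (by omega : l.length ≤ i + 3))]
      simp only [List.map_cons, List.map_nil]
      rw [show ((i : Int) + 3) = ((i : Int) + ((3 : Nat) : Int)) by norm_num,
          PySem.List.slice_natCast_add, h]
      rfl
  | case3 a b =>
      intro l i h
      have hlen : l.length = i + 2 := by
        have := congrArg List.length h; simp [List.length_drop] at this; omega
      rw [pyRange3_cons (by exact_mod_cast (by omega : i < l.length))]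
      rw [show ((i : Int) + 3) = ((i + 3 : Nat) : Int) by push_cast; ring,
          pyRange3_nil (by exact_mod_cast (by omega : l.length ≤ i + 3))]
      simp only [List.map_cons, List.map_nil]
      rw [show ((i : Int) + 3) = ((i : Int) + ((3 : Nat) : Int)) by norm_num,
          PySem.List.slice_natCast_add, h]
      rfl
  | case4 a b c r ih =>
      intro l i h
      have hlen : l.length = i + 3 + r.length := by
        have := congrArg List.length h; simp [List.length_drop] at this; omega
      rw [pyRange3_cons (by exact_mod_cast (by omega : i < l.length))]
      rw [show ((i : Int) + 3) = ((i + 3 : Nat) : Int) by push_cast; ring]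
      simp only [List.map_cons]
      rw [ih l (i + 3) (by rw [← List.drop_drop, h]; rfl)]
      rw [show ((i : Int) + 3) = ((i : Int) + ((3 : Nat) : Int)) by norm_num,
          PySem.List.slice_natCast_add, h]
      rfl

theorem chunks3_ne_nil {α : Type} {l : List α} (h : l ≠ []) : chunks3 l ≠ [] := by
  match l with
  | [a] => simp [chunks3]
  | [a, b] => simp [chunks3]
  | a :: b :: c :: r => simp [chunks3]

-- A's loop, characterised over the chars
theorem loopA : ∀ (n : Nat) (l : List String) (i : Nat) (init : String), l.length ≤ i + n →
    ((PySem.List.pyRange (i : Int) (l.length : Int) 1).foldl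
      (fun t j =>
        (if PySem.Int.mod j 3 = 0 then t ++ "<br>" else t) ++ PySem.List.pyGetD l j "" ++ ", ")
      init).toList
    = init.toList ++ tagCat i ((l.drop i).map String.toList) := by
  intro n
  induction n with
  | zero =>
      intro l i init h
      rw [PySem.List.pyRange_one_eq_nil (by exact_mod_cast (by omega : l.length ≤ i))]
      rw [List.drop_eq_nil_iff.mpr (by omega)]
      simp [tagCat]
  | succ n ih =>
      intro l i init h
      by_cases hi : i < l.length
      · rw [PySem.List.pyRange_one_cons (by exact_mod_cast hi)]
        rw [List.foldl_cons]
        rw [show ((i : Int) + 1) = ((i + 1 : Nat) : Int) by push_cast; ring]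
        rw [ih l (i + 1) _ (by omega)]
        rw [List.drop_eq_getElem_cons hi]
        simp only [List.map_cons, tagCat]
        rw [PySem.List.pyGetD_eq_getElem l "" (by positivity) (by exact_mod_cast hi)]
        rw [show PySem.Int.mod (i : Int) 3 = ((i % 3 : Nat) : Int) from PySem.Int.mod_natCast i 3]
        simp only [Int.toNat_natCast, Nat.cast_eq_zero]
        by_cases h3 : i % 3 = 0
        · simp [h3, List.append_assoc]
        · simp [h3, List.append_assoc]
      · rw [PySem.List.pyRange_one_eq_nil (by exact_mod_cast (by omega : l.length ≤ i))]
        rw [List.drop_eq_nil_iff.mpr (by omega)]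
        simp [tagCat]

-- the heart: A's accumulated text equals B's joined chunks plus the trailing ", "
theorem head_eq_J : ∀ (n : Nat) (a : String) (t : List String), t.length ≤ n →
    a.toList ++ ", ".toList ++ tagCat 1 (t.map String.toList)
      = joinedChunks (a :: t) ++ ", ".toList := by
  intro n
  induction n with
  | zero =>
      intro a t h
      match t, h with
      | [], _ =>
          simp [tagCat, joinedChunks, chunks3, PySem.Chars.join_singleton]
  | succ n ih =>
      intro a t h
      match t with
      | [] =>
          simp [tagCat, joinedChunks, chunks3, PySem.Chars.join_singleton]
      | [b] =>
          simp [tagCat, joinedChunks, chunks3, PySem.Chars.join_singleton,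
            PySem.Chars.join_cons_cons, List.append_assoc]
      | [b, c] =>
          simp [tagCat, joinedChunks, chunks3, PySem.Chars.join_singleton,
            PySem.Chars.join_cons_cons, List.append_assoc]
      | b :: c :: r =>
          match r with
          | [] =>
              simp [tagCat, joinedChunks, chunks3, PySem.Chars.join_singleton,
                PySem.Chars.join_cons_cons, List.append_assoc]
          | a' :: t' =>
              have hIH := ih a' t' (by simp only [List.length_cons] at h; omega)
              have hrec : joinedChunks (a :: b :: c :: a' :: t')
                  = PySem.Chars.join ", ".toList ([a, b, c].map String.toList)
                    ++ ", <br>".toList ++ joinedChunks (a' :: t') := by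
                unfold joinedChunks
                rw [show chunks3 (a :: b :: c :: a' :: t') = [a, b, c] :: chunks3 (a' :: t') from rfl]
                obtain ⟨hd, tl, hht⟩ := List.exists_cons_of_ne_nil
                  (chunks3_ne_nil (by simp) : chunks3 (a' :: t') ≠ [])
                rw [hht]
                simp [PySem.Chars.join_cons_cons, List.append_assoc]
              rw [hrec]
              rw [show (", <br>".toList : List Char) = ", ".toList ++ "<br>".toList from rfl]
              simp only [List.append_assoc] at hIH
              simp [tagCat, tagCat_phase,
                PySem.Chars.join_cons_cons, PySem.Chars.join_singleton,
                List.append_assoc]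
              simpa using hIH

-- B's port computes joinedChunks
theorem alt_toList (a : String) (t : List String) :
    (hover_text_alt (a :: t)).toList = joinedChunks (a :: t) := by
  unfold hover_text_alt
  rw [if_neg (by simp)]
  rw [PySem.Str.toList_join]
  unfold joinedChunks
  rw [show PySem.List.len (a :: t) = ((a :: t).length : Int) from rfl]
  rw [show ((0 : Int)) = ((0 : Nat) : Int) by norm_num]
  rw [List.map_map]
  have hcomp : (String.toList ∘ fun i => PySem.Str.join ", " (PySem.List.slice (a :: t) (some i) (some (i + 3))))
      = (fun c => PySem.Chars.join ", ".toList (List.map String.toList c))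
        ∘ (fun j => PySem.List.slice (a :: t) (some j) (some (j + 3))) := by
    funext i
    simp [PySem.Str.toList_join]
  rw [hcomp, ← List.map_map, mapSliceGen (a :: t) (a :: t) 0 rfl]

theorem hover_eq (l : List String) : hover_text l = hover_text_alt l := by
  match l with
  | [] => rfl
  | a :: t =>
      apply String.toList_inj.mp
      rw [alt_toList]
      unfold hover_text
      rw [if_neg (by simp)]
      simp only []
      rw [show PySem.List.len (a :: t) = ((a :: t).length : Int) from rfl]
      simp only [PySem.Str.slice, String.toList_ofList]
      have hl := loopA (a :: t).length (a :: t) 1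
        (PySem.List.pyGetD (a :: t) 0 "" ++ ", ") (by omega)
      rw [Nat.cast_one] at hl
      rw [hl]
      rw [show (a :: t).drop 1 = t from rfl]
      rw [show PySem.List.pyGetD (a :: t) 0 "" = a by
        rw [PySem.List.pyGetD_eq_getElem (a :: t) "" le_rfl (by simp)]; rfl]
      rw [show (a ++ ", ").toList = a.toList ++ ", ".toList by simp]
      rw [head_eq_J t.length a t le_rfl]
      simp only [PySem.Chars.slice]
      rw [PySem.List.slice_to_neg_ofNat _ 2 (by norm_num)]
      rw [show (joinedChunks (a :: t) ++ ", ".toList).length - 2 = (joinedChunks (a :: t)).length by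
        simp]
      exact List.take_left

-- ===== VERDICT (by name: the statement is the Claim_ definition above) =====
theorem hover_text_spec : Claim_equal_hover_text := by
  intro l _
  unfold Spec_hover_text
  exact hover_eq l
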